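-- pv_equiv track=rewrite | github.com/lcbb/DNA-Memory-Blocks | sequencing_analysis/utils.py | align_sequences
-- ===== SOURCE A (Python) =====
-- def align_sequences(sequence, template):
--   # Returns the optimal sequence alignment position assuming no deletions
--   # The best alignment is the one with the lowest hamming distance
--   seq_len = len(sequence)
--
--   best_pos = None
--   best_score = -1
--   for i in range(len(sequence)):
--     sequence_sub = sequence[i:]
--     template_sub = template[:seq_len-i]
--     score = sum(a==b for a,b in zip(sequence_sub,template_sub))
--     if score >= best_score:
--       best_pos = -i
--       best_score = score
--   for i in range(len(template)):
--     template_sub = template[i:i+seq_len]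
--     sequence_sub = sequence[:len(template_sub)]
--     score = sum(a==b for a,b in zip(sequence_sub,template_sub))
-- #    print i, score, best_pos, best_score
-- #    print template_sub
-- #    print sequence
--     if score >= best_score:
--       best_pos = i
--       best_score = score
-- #  print best_pos, best_score
--   return best_pos, best_score
-- ===== SOURCE B (Python) =====
-- def align_sequences(sequence, template):
--     # Same result as A, but scores for all offsets are accumulated in one pass
--     # via a per-character position index of the template, instead of recomputing
--     # a full zip-scan per offset.
--     n = len(sequence)
--     m = len(template)
--     pos = {}
--     for k, c in enumerate(template):
--         pos.setdefault(c, []).append(k)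
--     scores = {}
--     for j, c in enumerate(sequence):
--         for k in pos.get(c, ()):
--             d = k - j
--             scores[d] = scores.get(d, 0) + 1
--     best_pos = None
--     best_score = -1
--     for i in range(n):
--         s = scores.get(-i, 0)
--         if s >= best_score:
--             best_pos, best_score = -i, s
--     for d in range(m):
--         s = scores.get(d, 0)
--         if s >= best_score:
--             best_pos, best_score = d, s
--     return best_pos, best_score
-- ===== Notes on version B (the rewrite author's own statement) =====
-- stated objective: alternative
-- what changed: Instead of recomputing a full zip-scan of the overlap for every shift, B builds a per-character position index of the template and accumulates all offset match-counts in one pass over the sequence, then scans the precomputed scores to pick the best offset with A's tie-breaking.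
import Mathlib
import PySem

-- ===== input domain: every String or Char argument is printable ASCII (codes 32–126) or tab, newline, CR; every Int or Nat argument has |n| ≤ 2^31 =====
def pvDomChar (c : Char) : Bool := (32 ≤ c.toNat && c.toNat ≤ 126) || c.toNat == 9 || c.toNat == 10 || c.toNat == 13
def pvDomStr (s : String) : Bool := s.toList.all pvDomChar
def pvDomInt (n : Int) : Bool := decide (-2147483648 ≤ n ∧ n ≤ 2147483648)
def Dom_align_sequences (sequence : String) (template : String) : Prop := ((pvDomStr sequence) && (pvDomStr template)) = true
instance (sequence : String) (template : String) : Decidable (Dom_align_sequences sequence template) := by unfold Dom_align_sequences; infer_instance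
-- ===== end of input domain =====

-- B replaces A's per-offset zip rescan by a single accumulation pass over a
-- per-character position index of the template (objective: alternative).

-- ===== PORT A =====
-- sum(a==b for a,b in zip(xs, ys))
def pvZipScore (xs ys : List Char) : Int :=
  (xs.zip ys).foldl (fun acc p => acc + (if p.1 = p.2 then 1 else 0)) 0

def align_sequences (sequence : String) (template : String) : Option Int × Int :=
  let s := sequence.toList
  let t := template.toList
  let seq_len : Int := s.length
  let st1 := (PySem.List.pyRange 0 (s.length : Int) 1).foldl
    (fun (b : Option Int × Int) i =>
      let sequence_sub := PySem.List.slice s (some i) none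
      let template_sub := PySem.List.slice t none (some (seq_len - i))
      let score := pvZipScore sequence_sub template_sub
      if score ≥ b.2 then (some (-i), score) else b)
    (none, -1)
  (PySem.List.pyRange 0 (t.length : Int) 1).foldl
    (fun (b : Option Int × Int) i =>
      let template_sub := PySem.List.slice t (some i) (some (i + seq_len))
      let sequence_sub := PySem.List.slice s none (some (template_sub.length : Int))
      let score := pvZipScore sequence_sub template_sub
      if score ≥ b.2 then (some i, score) else b)
    st1

-- ===== PORT B =====
def align_sequences_alt (sequence : String) (template : String) : Option Int × Int :=
  let s := sequence.toList
  let t := template.toList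
  let n : Int := s.length
  let m : Int := t.length
  -- pos.setdefault(c, []).append(k)
  let pos : PySem.Dict Char (List Int) :=
    (PySem.List.enumerate t 0).foldl (fun d p => d.modify p.2 [] (· ++ [p.1])) PySem.Dict.empty
  -- scores[k-j] = scores.get(k-j, 0) + 1
  let scores : PySem.Dict Int Int :=
    (PySem.List.enumerate s 0).foldl (fun sc p =>
      (pos.getD p.2 []).foldl (fun sc2 k => sc2.modify (k - p.1) 0 (· + 1)) sc)
      PySem.Dict.empty
  let st1 := (PySem.List.pyRange 0 n 1).foldl
    (fun (b : Option Int × Int) i =>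
      let sc := scores.getD (-i) 0
      if sc ≥ b.2 then (some (-i), sc) else b)
    (none, -1)
  (PySem.List.pyRange 0 m 1).foldl
    (fun (b : Option Int × Int) d =>
      let sc := scores.getD d 0
      if sc ≥ b.2 then (some d, sc) else b)
    st1

-- ===== PRECONDITION & SPEC =====
def Spec_align_sequences (sequence : String) (template : String) (out : Option Int × Int) : Prop := out = align_sequences_alt sequence template
instance (sequence : String) (template : String) (out : Option Int × Int) : Decidable (Spec_align_sequences sequence template out) := by unfold Spec_align_sequences; infer_instance

-- ===== CLAIM (what is proved, stated in full; the proofs are below) =====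
def Claim_equal_align_sequences : Prop := ∀ (sequence : String) (template : String), Dom_align_sequences sequence template → Spec_align_sequences sequence template (align_sequences sequence template)

-- ===== LEMMAS AND PROOFS =====

-- does sequence position p match the template at offset d?
def pvMatch (t : List Char) (d : Int) (p : Int × Char) : Bool :=
  decide (0 ≤ d + p.1) && (t[(d + p.1).toNat]? == some p.2)

def pvCountEq (xs ys : List Char) : Nat :=
  (xs.zip ys).countP (fun p => p.1 == p.2)

theorem fold_ite (l : List (Char × Char)) : ∀ (a : Int),
    l.foldl (fun acc p => acc + (if p.1 = p.2 then 1 else 0)) a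
      = a + (l.countP (fun p => p.1 == p.2) : Int) := by
  induction l with
  | nil => simp
  | cons x xs ih =>
    intro a
    simp only [List.foldl_cons, List.countP_cons, ih]
    by_cases h : x.1 = x.2
    · simp [h]
      ring
    · simp [h]

theorem pvZipScore_eq (xs ys : List Char) :
    pvZipScore xs ys = (pvCountEq xs ys : Int) := by
  unfold pvZipScore pvCountEq
  rw [fold_ite]
  ring

theorem zip_take_right (xs : List Char) : ∀ (ys : List Char) (k : Nat),
    xs.length ≤ k → xs.zip (ys.take k) = xs.zip ys := by
  induction xs with
  | nil => simp
  | cons x xs ih =>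
    intro ys k h
    cases ys with
    | nil => simp
    | cons y ys =>
      cases k with
      | zero => simp at h
      | succ k => simp [List.zip_cons_cons, ih ys k (by simpa using h)]

theorem take_zip_left (xs : List Char) : ∀ (ys : List Char),
    (xs.take ys.length).zip ys = xs.zip ys := by
  induction xs with
  | nil => simp
  | cons x xs ih =>
    intro ys
    cases ys with
    | nil => simp
    | cons y ys => simp [List.zip_cons_cons, ih ys]

theorem cnt_shift (t : List Char) (s : List Char) : ∀ (a d : Int),
    (PySem.List.enumerate s a).countP (pvMatch t d)
      = (PySem.List.enumerate s 0).countP (pvMatch t (d + a)) := by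
  induction s with
  | nil => simp [PySem.List.enumerate_nil]
  | cons x xs ih =>
    intro a d
    rw [PySem.List.enumerate_cons, PySem.List.enumerate_cons]
    rw [List.countP_cons, List.countP_cons, ih (a+1) d, ih (0+1) (d+a)]
    have h1 : d + (a + 1) = d + a + (0 + 1) := by ring
    have h2 : pvMatch t d (a, x) = pvMatch t (d + a) (0, x) := by
      simp [pvMatch]
    rw [h1, h2]

theorem cnt_drop (s : List Char) : ∀ (t : List Char) (i : Nat),
    (PySem.List.enumerate s 0).countP (pvMatch t (i : Int)) = pvCountEq s (t.drop i) := by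
  induction s with
  | nil => simp [PySem.List.enumerate_nil, pvCountEq]
  | cons x xs ih =>
    intro t i
    rw [PySem.List.enumerate_cons, List.countP_cons, cnt_shift]
    have hc : ((i : Int) + (0 + 1)) = ((i + 1 : Nat) : Int) := by push_cast; ring
    rw [hc, ih]
    by_cases h : i < t.length
    · rw [List.drop_eq_getElem_cons h]
      simp only [pvCountEq, List.zip_cons_cons, List.countP_cons]
      have : pvMatch t (i : Int) (0, x) = (x == t[i]) := by
        simp [pvMatch, List.getElem?_eq_getElem h, eq_comm]
      simp [this]
    · have h1 : t.drop i = [] := by simp; omega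
      have h2 : t.drop (i+1) = [] := by simp; omega
      have : pvMatch t (i : Int) (0, x) = false := by
        simp [pvMatch, List.getElem?_eq_none (show t.length ≤ i from by omega)]
      simp [h1, h2, this, pvCountEq]

theorem cnt_neg (s : List Char) : ∀ (t : List Char) (i : Nat),
    (PySem.List.enumerate s 0).countP (pvMatch t (-(i : Int))) = pvCountEq (s.drop i) t := by
  induction s with
  | nil => simp [PySem.List.enumerate_nil, pvCountEq]
  | cons x xs ih =>
    intro t i
    cases i with
    | zero => simpa using cnt_drop (x :: xs) t 0
    | succ i =>
      rw [PySem.List.enumerate_cons, List.countP_cons, cnt_shift]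
      have hc : (-((i+1 : Nat) : Int) + (0 + 1)) = -(i : Int) := by push_cast; ring
      rw [hc, ih]
      have hx : pvMatch t (-((i+1 : Nat) : Int)) (0, x) = false := by
        simp [pvMatch]; omega
      rw [hx, List.drop_succ_cons]
      simp

-- pos dict: value list for c = positions of c in t (as Ints, increasing)
theorem pos_getD (t : List Char) (c : Char) :
    (((PySem.List.enumerate t 0).foldl
        (fun d p => d.modify p.2 [] (· ++ [p.1])) PySem.Dict.empty).getD c [])
      = (((PySem.List.enumerate t 0).filter (fun p => p.2 == c)).map (·.1)) := by
  have h := PySem.Dict.getD_foldl_modify_append ((PySem.List.enumerate t 0).map Prod.swap)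
    (PySem.Dict.empty (κ := Char) (ν := List Int)) c
  rw [List.foldl_map] at h
  simp only [Prod.swap] at h
  rw [show ((PySem.List.enumerate t 0).foldl
        (fun d p => d.modify p.2 [] (· ++ [p.1])) PySem.Dict.empty)
      = ((PySem.List.enumerate t 0).foldl
        (fun d p => d.modify (p.2, p.1).1 [] (· ++ [(p.2, p.1).2])) PySem.Dict.empty) from rfl]
  rw [h]
  simp [List.filter_map, List.map_map, Function.comp_def]

theorem pos_count (t : List Char) (c : Char) (x : Int) :
    (((PySem.List.enumerate t 0).foldl
        (fun d p => d.modify p.2 [] (· ++ [p.1])) PySem.Dict.empty).getD c []).count x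
      = if decide (0 ≤ x) && (t[x.toNat]? == some c) then 1 else 0 := by
  rw [pos_getD]
  have hnd : ((((PySem.List.enumerate t 0).filter (fun p => p.2 == c)).map (·.1))).Nodup := by
    have hsub : (((PySem.List.enumerate t 0).filter (fun p => p.2 == c)).map (·.1)).Sublist
        ((PySem.List.enumerate t 0).map (·.1)) :=
      List.Sublist.map _ List.filter_sublist
    refine hsub.nodup ?_
    rw [PySem.List.map_fst_enumerate]
    exact PySem.List.nodup_pyRange_one 0 _
  have hmem : x ∈ (((PySem.List.enumerate t 0).filter (fun p => p.2 == c)).map (·.1))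
      ↔ (decide (0 ≤ x) && (t[x.toNat]? == some c)) = true := by
    simp only [List.mem_map, List.mem_filter, PySem.List.mem_enumerate_iff]
    constructor
    · rintro ⟨p, ⟨⟨k, hk, rfl⟩, hc2⟩, rfl⟩
      simp_all
    · intro h
      simp only [Bool.and_eq_true, decide_eq_true_eq, beq_iff_eq] at h
      obtain ⟨h0, hg⟩ := h
      have hlt : x.toNat < t.length := (List.getElem?_eq_some_iff.mp hg).1
      refine ⟨((x.toNat : Int), c), ⟨⟨x.toNat, hlt, ?_⟩, by simp⟩, by simp; omega⟩
      have := (List.getElem?_eq_some_iff.mp hg).2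
      simp [this]
  by_cases h : (decide (0 ≤ x) && (t[x.toNat]? == some c)) = true
  · rw [if_pos h, List.count_eq_one_of_mem hnd (hmem.mpr h)]
  · rw [if_neg h, List.count_eq_zero_of_not_mem]
    intro hx; exact h (hmem.mp hx)

theorem inner_acc (d j : Int) : ∀ (L : List Int) (sc : PySem.Dict Int Int),
    (L.foldl (fun sc2 k => sc2.modify (k - j) 0 (· + 1)) sc).getD d 0
      = sc.getD d 0 + (L.count (d + j) : Int) := by
  intro L sc
  have hmap : L.foldl (fun sc2 k => sc2.modify (k - j) 0 (· + 1)) sc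
      = (L.map (fun k => k - j)).foldl (fun sc2 x => sc2.modify x 0 (· + 1)) sc := by
    rw [List.foldl_map]
  rw [hmap, PySem.Dict.getD_foldl_modify_add_one]
  have : (L.map (fun k => k - j)).count d = L.count (d + j) := by
    have hinj : Function.Injective (fun k : Int => k - j) := fun a b h => by
      simpa using congrArg (· + j) h
    have := List.count_map_of_injective L (fun k : Int => k - j) hinj (d + j)
    simpa using this
  rw [this]

theorem scores_acc (t : List Char) (d : Int) : ∀ (l : List (Int × Char)) (init : PySem.Dict Int Int),
    (l.foldl (fun sc p =>
        ((((PySem.List.enumerate t 0).foldl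
            (fun d p => d.modify p.2 [] (· ++ [p.1])) PySem.Dict.empty).getD p.2 []).foldl
          (fun sc2 k => sc2.modify (k - p.1) 0 (· + 1)) sc)) init).getD d 0
      = init.getD d 0 + (l.countP (pvMatch t d) : Int) := by
  intro l
  induction l with
  | nil => simp
  | cons p l ih =>
    intro init
    rw [List.foldl_cons, ih, inner_acc, List.countP_cons, pos_count]
    have : (if decide (0 ≤ d + p.1) && (t[(d + p.1).toNat]? == some p.2) then 1 else 0)
        = (if pvMatch t d p = true then 1 else 0) := by rfl
    rw [this]
    push_cast
    split <;> ring

theorem scores_getD (s t : List Char) (d : Int) :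
    (((PySem.List.enumerate s 0).foldl (fun sc p =>
        ((((PySem.List.enumerate t 0).foldl
            (fun d p => d.modify p.2 [] (· ++ [p.1])) PySem.Dict.empty).getD p.2 []).foldl
          (fun sc2 k => sc2.modify (k - p.1) 0 (· + 1)) sc))
        PySem.Dict.empty).getD d 0)
      = ((PySem.List.enumerate s 0).countP (pvMatch t d) : Int) := by
  rw [scores_acc]
  simp

-- A's first-loop score at shift i equals the match count at offset -i
theorem score1_eq (s t : List Char) (i : Int) (h0 : 0 ≤ i) (h1 : i < (s.length : Int)) :
    pvZipScore (PySem.List.slice s (some i) none)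
        (PySem.List.slice t none (some ((s.length : Int) - i)))
      = ((PySem.List.enumerate s 0).countP (pvMatch t (-i)) : Int) := by
  rw [PySem.List.slice_from s h0, PySem.List.slice_to t (by omega), pvZipScore_eq]
  have hlen : (s.drop i.toNat).length ≤ ((s.length : Int) - i).toNat := by
    simp; omega
  have hz : pvCountEq (s.drop i.toNat) (t.take ((s.length : Int) - i).toNat)
      = pvCountEq (s.drop i.toNat) t := by
    unfold pvCountEq
    rw [zip_take_right _ t _ hlen]
  rw [hz, ← cnt_neg s t i.toNat]
  have hcast : -((i.toNat : Nat) : Int) = -i := by omega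
  rw [hcast]

-- A's second-loop score at shift i equals the match count at offset i
theorem score2_eq (s t : List Char) (i : Int) (h0 : 0 ≤ i) :
    pvZipScore
        (PySem.List.slice s none (some (((PySem.List.slice t (some i) (some (i + (s.length : Int)))).length : Int))))
        (PySem.List.slice t (some i) (some (i + (s.length : Int))))
      = ((PySem.List.enumerate s 0).countP (pvMatch t i) : Int) := by
  have hts : PySem.List.slice t (some i) (some (i + (s.length : Int)))
      = (t.drop i.toNat).take s.length := by
    rw [PySem.List.slice_toNat t h0 (by omega)]
    congr 1
    omega
  rw [hts, PySem.List.slice_to_natCast, pvZipScore_eq]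
  have hz : pvCountEq (s.take ((t.drop i.toNat).take s.length).length)
        ((t.drop i.toNat).take s.length) = pvCountEq s (t.drop i.toNat) := by
    unfold pvCountEq
    rw [take_zip_left, zip_take_right s (t.drop i.toNat) s.length le_rfl]
  rw [hz, ← cnt_drop s t i.toNat]
  have hcast : (((i.toNat : Nat)) : Int) = i := by omega
  rw [hcast]

-- ===== VERDICT (by name: the statement is the Claim_ definition above) =====
theorem align_sequences_spec : Claim_equal_align_sequences := by
  intro sequence template _
  unfold Spec_align_sequences align_sequences align_sequences_alt
  simp only []
  set s := sequence.toList with hs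
  set t := template.toList with ht
  have hst1 : (PySem.List.pyRange 0 (s.length : Int) 1).foldl
      (fun (b : Option Int × Int) i =>
        let sequence_sub := PySem.List.slice s (some i) none
        let template_sub := PySem.List.slice t none (some ((s.length : Int) - i))
        let score := pvZipScore sequence_sub template_sub
        if score ≥ b.2 then (some (-i), score) else b) (none, -1)
      = (PySem.List.pyRange 0 (s.length : Int) 1).foldl
      (fun (b : Option Int × Int) i =>
        let sc := (((PySem.List.enumerate s 0).foldl (fun sc p =>
            ((((PySem.List.enumerate t 0).foldl
                (fun d p => d.modify p.2 [] (· ++ [p.1])) PySem.Dict.empty).getD p.2 []).foldl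
              (fun sc2 k => sc2.modify (k - p.1) 0 (· + 1)) sc)) PySem.Dict.empty).getD (-i) 0)
        if sc ≥ b.2 then (some (-i), sc) else b) (none, -1) := by
    apply PySem.List.foldl_congr_mem
    intro acc i hi
    obtain ⟨hi0, hi1⟩ := (PySem.List.mem_pyRange_one).mp hi
    simp only [score1_eq s t i hi0 hi1, scores_getD s t (-i)]
  rw [hst1]
  apply PySem.List.foldl_congr_mem
  intro acc i hi
  obtain ⟨hi0, hi1⟩ := (PySem.List.mem_pyRange_one).mp hi
  simp only [score2_eq s t i hi0, scores_getD s t i]
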